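-- pv_equiv track=rewrite | github.com/pt11-word-find/back-end | sumoftwo.py | sumOfTwo
-- ===== SOURCE A (Python) =====
-- def sumOfTwo(a,b,v):
--     hash = {}
--     for i in a:
--         if i in hash.keys():
--             continue
--         else:
--             hash[i] = v - i
--     for i in b:
--         if i in hash.values():
--             return True
--     return False
-- ===== SOURCE B (Python) =====
-- def sumOfTwo(a, b, v):
--     xs = sorted(a)
--     ys = sorted(b, reverse=True)
--     i = j = 0
--     while i < len(xs) and j < len(ys):
--         s = xs[i] + ys[j]
--         if s == v:
--             return True
--         if s < v:
--             i += 1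
--         else:
--             j += 1
--     return False
-- ===== Notes on version B (the rewrite author's own statement) =====
-- stated objective: faster
-- what changed: Replaces the complement dict plus O(|a|) scan of hash.values() per element of b with sort-then-two-pointers: a sorted ascending, b sorted descending, one synchronized sweep advancing whichever pointer the sum x+y lands below or above v.
import Mathlib
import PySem

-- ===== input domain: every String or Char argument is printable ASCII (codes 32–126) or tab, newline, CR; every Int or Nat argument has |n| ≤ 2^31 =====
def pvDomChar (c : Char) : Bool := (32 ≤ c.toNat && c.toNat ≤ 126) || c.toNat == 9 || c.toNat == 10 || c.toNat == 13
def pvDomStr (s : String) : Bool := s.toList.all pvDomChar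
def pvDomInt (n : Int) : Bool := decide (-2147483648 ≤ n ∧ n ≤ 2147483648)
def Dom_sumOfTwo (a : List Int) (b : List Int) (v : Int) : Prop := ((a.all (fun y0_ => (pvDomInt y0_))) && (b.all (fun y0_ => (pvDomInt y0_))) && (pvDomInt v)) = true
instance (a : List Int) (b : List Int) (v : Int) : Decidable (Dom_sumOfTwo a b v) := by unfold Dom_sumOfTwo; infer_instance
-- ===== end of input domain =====

-- B replaces A's complement dict and its per-element scan of hash.values() with
-- sort-then-two-pointers: a ascending, b descending, one synchronized sweep (objective: faster).

-- ===== PORT A =====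
-- the first loop: skip keys already present, else hash[i] = v - i
def sumOfTwo (a : List Int) (b : List Int) (v : Int) : Bool :=
  let hash := a.foldl (fun d i => if d.contains i then d else d.insert i (v - i))
    (PySem.Dict.empty : PySem.Dict Int Int)
  -- second loop: return True on the first i of b with i in hash.values()
  b.any (fun i => hash.values.contains i)

-- ===== PORT B =====
-- the while loop of Source B: advancing index i (resp. j) = dropping the head of xs (resp. ys)
def twoPtr (v : Int) : List Int → List Int → Bool
  | [], _ => false
  | _ :: _, [] => false
  | x :: xs, y :: ys =>
    if x + y == v then true
    else if x + y < v then twoPtr v xs (y :: ys)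
    else twoPtr v (x :: xs) ys
termination_by xs ys => xs.length + ys.length

def sumOfTwo_alt (a : List Int) (b : List Int) (v : Int) : Bool :=
  let xs := PySem.List.sorted a (fun x => x) false
  let ys := PySem.List.sorted b (fun x => x) true
  twoPtr v xs ys

-- ===== PRECONDITION & SPEC =====
def Spec_sumOfTwo (a : List Int) (b : List Int) (v : Int) (out : Bool) : Prop := out = sumOfTwo_alt a b v
instance (a : List Int) (b : List Int) (v : Int) (out : Bool) : Decidable (Spec_sumOfTwo a b v out) := by unfold Spec_sumOfTwo; infer_instance

-- ===== CLAIM =====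
def Claim_equal_sumOfTwo : Prop := ∀ (a : List Int) (b : List Int) (v : Int), Dom_sumOfTwo a b v → Spec_sumOfTwo a b v (sumOfTwo a b v)

-- ===== LEMMAS AND PROOFS =====

-- invariant of A's first loop: every stored value is v minus its key, and a value x is
-- present after the loop iff it was present before or is v - i for some i of the list
theorem values_fold_mem (v : Int) (a : List Int) (d : PySem.Dict Int Int)
    (hinv : ∀ p ∈ d.items, p.2 = v - p.1) (x : Int) :
    x ∈ (a.foldl (fun d i => if d.contains i then d else d.insert i (v - i)) d).values
      ↔ x ∈ d.values ∨ ∃ i ∈ a, x = v - i := by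
  induction a generalizing d with
  | nil => simp
  | cons i rest ih =>
    simp only [List.foldl_cons]
    by_cases hc : d.contains i = true
    · rw [if_pos hc, ih d hinv]
      constructor
      · rintro (h | ⟨j, hj, hx⟩)
        · exact Or.inl h
        · exact Or.inr ⟨j, List.mem_cons_of_mem _ hj, hx⟩
      · rintro (h | ⟨j, hj, hx⟩)
        · exact Or.inl h
        · rcases List.mem_cons.mp hj with rfl | hj
          · left
            rw [PySem.Dict.contains_iff_mem_keys] at hc
            simp only [PySem.Dict.keys, List.mem_map] at hc
            obtain ⟨p, hp, hpk⟩ := hc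
            have := hinv p hp
            simp only [PySem.Dict.values, List.mem_map]
            exact ⟨p, hp, by rw [this, hpk, hx]⟩
          · exact Or.inr ⟨j, hj, hx⟩
    · rw [if_neg hc]
      have hc' : d.contains i = false := by simpa using hc
      have hinv' : ∀ p ∈ (d.insert i (v - i)).items, p.2 = v - p.1 := by
        intro p hp
        rcases (PySem.Dict.mem_items_insert _ _ _ _).mp hp with rfl | ⟨hp, _⟩
        · rfl
        · exact hinv p hp
      rw [ih _ hinv']
      have hvals : (d.insert i (v - i)).values = d.values ++ [v - i] := by
        simp only [PySem.Dict.values, PySem.Dict.items_insert, hc', Bool.false_eq_true,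
          if_false, List.map_append, List.map_cons, List.map_nil]
      rw [hvals]
      simp only [List.mem_append, List.mem_cons, List.not_mem_nil, or_false]
      constructor
      · rintro ((h | h) | ⟨j, hj, hx⟩)
        · exact Or.inl h
        · exact Or.inr ⟨i, Or.inl rfl, h⟩
        · exact Or.inr ⟨j, Or.inr hj, hx⟩
      · rintro (h | ⟨j, rfl | hj, hx⟩)
        · exact Or.inl (Or.inl h)
        · exact Or.inl (Or.inr hx)
        · exact Or.inr ⟨j, hj, hx⟩

-- A returns true iff some pair across the two lists sums to v
theorem sumOfTwo_iff (a b : List Int) (v : Int) :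
    sumOfTwo a b v = true ↔ ∃ x ∈ a, ∃ y ∈ b, x + y = v := by
  unfold sumOfTwo
  simp only [List.any_eq_true, List.contains_iff_mem]
  constructor
  · rintro ⟨j, hj, hmem⟩
    rw [values_fold_mem v a PySem.Dict.empty (by simp [PySem.Dict.empty, PySem.Dict.items])] at hmem
    rcases hmem with h | ⟨i, hi, rfl⟩
    · simp [PySem.Dict.empty, PySem.Dict.values] at h
    · exact ⟨i, hi, v - i, hj, by ring⟩
  · rintro ⟨x, hx, y, hy, hsum⟩
    refine ⟨y, hy, ?_⟩
    rw [values_fold_mem v a PySem.Dict.empty (by simp [PySem.Dict.empty, PySem.Dict.items])]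
    exact Or.inr ⟨x, hx, by omega⟩

-- two-pointer sweep correctness on an ascending xs and a descending ys
theorem twoPtr_iff (v : Int) (xs ys : List Int)
    (hx : xs.Pairwise (· ≤ ·)) (hy : ys.Pairwise (fun p q => q ≤ p)) :
    twoPtr v xs ys = true ↔ ∃ x ∈ xs, ∃ y ∈ ys, x + y = v := by
  induction xs, ys using twoPtr.induct v with
  | case1 ys => simp [twoPtr]
  | case2 x xs => simp [twoPtr]
  | case3 x xs y ys heq =>
    simp only [twoPtr, heq, if_pos]
    have : x + y = v := by simpa using heq
    exact ⟨fun _ => ⟨x, List.mem_cons_self, y, List.mem_cons_self, this⟩, fun _ => trivial⟩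
  | case4 x xs y ys hne hlt ih =>
    rw [List.pairwise_cons] at hx
    have ihh := ih hx.2 hy
    simp only [twoPtr, hne, Bool.false_eq_true, if_false, if_pos hlt, ihh]
    constructor
    · rintro ⟨p, hp, q, hq, h⟩
      exact ⟨p, List.mem_cons_of_mem _ hp, q, hq, h⟩
    · rintro ⟨p, hp, q, hq, h⟩
      rcases List.mem_cons.mp hp with rfl | hp
      · -- p = x: q ≤ y so x + q ≤ x + y < v, contradicting x + q = v
        exfalso
        have hqy : q ≤ y := by
          rcases List.mem_cons.mp hq with rfl | hq
          · exact le_refl q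
          · exact (List.pairwise_cons.mp hy).1 q hq
        omega
      · exact ⟨p, hp, q, hq, h⟩
  | case5 x xs y ys hne hge ih =>
    rw [List.pairwise_cons] at hy
    have ihh := ih hx hy.2
    simp only [twoPtr, hne, Bool.false_eq_true, if_false, if_neg hge, ihh]
    have hnev : ¬ (x + y = v) := by simpa using hne
    constructor
    · rintro ⟨p, hp, q, hq, h⟩
      exact ⟨p, hp, q, List.mem_cons_of_mem _ hq, h⟩
    · rintro ⟨p, hp, q, hq, h⟩
      rcases List.mem_cons.mp hq with rfl | hq
      · -- q = y: x ≤ p so p + y ≥ x + y > v, contradicting p + y = v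
        exfalso
        have hxp : x ≤ p := by
          rcases List.mem_cons.mp hp with rfl | hp
          · exact le_refl p
          · exact (List.pairwise_cons.mp hx).1 p hp
        omega
      · exact ⟨p, hp, q, hq, h⟩

theorem sumOfTwo_alt_iff (a b : List Int) (v : Int) :
    sumOfTwo_alt a b v = true ↔ ∃ x ∈ a, ∃ y ∈ b, x + y = v := by
  unfold sumOfTwo_alt
  rw [twoPtr_iff v _ _ (PySem.List.sorted_pairwise a (fun x => x))
      (PySem.List.sorted_pairwise_rev b (fun x => x))]
  simp [PySem.List.mem_sorted]

-- ===== VERDICT =====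
theorem sumOfTwo_spec : Claim_equal_sumOfTwo := by
  intro a b v _
  unfold Spec_sumOfTwo
  rw [Bool.eq_iff_iff, sumOfTwo_iff, sumOfTwo_alt_iff]
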